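-- pv_equiv track=rewrite | github.com/bolajil/genai-knowledge-assistant | app/auth/ad_connector.py | map_groups_to_role
-- ===== SOURCE A (Python) =====
-- def map_groups_to_role(groups: list) -> str:
--     """Map AD groups to VaultMind roles"""
--     # Define group to role mapping
--     role_mappings = {
--         'admin': ['Domain Admins', 'VaultMind Admins', 'IT Administrators'],
--         'user': ['VaultMind Users', 'Domain Users', 'All Users'],
--         'viewer': ['VaultMind Viewers', 'Read Only Users']
--     }
--
--     # Check for admin role first
--     for group in groups:
--         for admin_group in role_mappings['admin']:
--             if admin_group.lower() in group.lower():
--                 return 'admin'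
--
--     # Check for user role
--     for group in groups:
--         for user_group in role_mappings['user']:
--             if user_group.lower() in group.lower():
--                 return 'user'
--
--     # Default to viewer
--     return 'viewer'
-- ===== SOURCE B (Python) =====
-- def map_groups_to_role(groups: list) -> str:
--     """Map AD groups to VaultMind roles (single pass with a found-user flag)"""
--     role_mappings = {
--         'admin': ['Domain Admins', 'VaultMind Admins', 'IT Administrators'],
--         'user': ['VaultMind Users', 'Domain Users', 'All Users'],
--         'viewer': ['VaultMind Viewers', 'Read Only Users']
--     }
--     found_user = False
--     for group in groups:
--         gl = group.lower()
--         if any(a.lower() in gl for a in role_mappings['admin']):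
--             return 'admin'
--         if any(u.lower() in gl for u in role_mappings['user']):
--             found_user = True
--     return 'user' if found_user else 'viewer'
-- ===== Notes on version B (the rewrite author's own statement) =====
-- stated objective: alternative
-- what changed: Replaced A's two separate passes over the group list (admin scan, then user scan) by one single pass that returns 'admin' immediately and records a found-user flag, deciding 'user' vs 'viewer' after the loop.
import Mathlib
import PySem

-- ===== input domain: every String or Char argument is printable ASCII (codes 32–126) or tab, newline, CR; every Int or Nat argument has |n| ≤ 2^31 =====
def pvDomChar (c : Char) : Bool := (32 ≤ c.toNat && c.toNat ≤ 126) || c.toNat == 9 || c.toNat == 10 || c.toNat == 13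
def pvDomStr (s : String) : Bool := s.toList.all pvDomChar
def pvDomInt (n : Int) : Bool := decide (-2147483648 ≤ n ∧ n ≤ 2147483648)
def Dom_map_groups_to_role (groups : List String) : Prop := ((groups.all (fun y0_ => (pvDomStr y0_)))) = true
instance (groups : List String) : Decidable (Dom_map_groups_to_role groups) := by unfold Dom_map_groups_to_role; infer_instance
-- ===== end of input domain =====

-- B changes the decomposition only (one pass with a found-user flag instead of A's two passes); same values.

-- ===== PORT A =====
-- the role_mappings dict entries A iterates over
def pvAdminGroups : List String := ["Domain Admins", "VaultMind Admins", "IT Administrators"]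
def pvUserGroups : List String := ["VaultMind Users", "Domain Users", "All Users"]

-- inner 'for … if …: return' over a constant list = List.any; outer loop with early return likewise
def map_groups_to_role (groups : List String) : String :=
  if groups.any (fun g => pvAdminGroups.any (fun a => PySem.Str.isIn (PySem.Str.lower a) (PySem.Str.lower g))) then "admin"
  else if groups.any (fun g => pvUserGroups.any (fun u => PySem.Str.isIn (PySem.Str.lower u) (PySem.Str.lower g))) then "user"
  else "viewer"

-- ===== PORT B =====
-- single loop carrying the found_user flag
def pvBLoop (gs : List String) (foundUser : Bool) : String :=
  match gs with
  | [] => if foundUser then "user" else "viewer"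
  | g :: rest =>
    let gl := PySem.Str.lower g
    if pvAdminGroups.any (fun a => PySem.Str.isIn (PySem.Str.lower a) gl) then "admin"
    else if pvUserGroups.any (fun u => PySem.Str.isIn (PySem.Str.lower u) gl) then pvBLoop rest true
    else pvBLoop rest foundUser

def map_groups_to_role_alt (groups : List String) : String :=
  pvBLoop groups false

-- ===== PRECONDITION & SPEC =====
def Spec_map_groups_to_role (groups : List String) (out : String) : Prop := out = map_groups_to_role_alt groups
instance (groups : List String) (out : String) : Decidable (Spec_map_groups_to_role groups out) := by unfold Spec_map_groups_to_role; infer_instance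

-- ===== CLAIM (what is proved, stated in full; the proofs are below) =====
def Claim_equal_map_groups_to_role : Prop := ∀ (groups : List String), Dom_map_groups_to_role groups → Spec_map_groups_to_role groups (map_groups_to_role groups)

-- ===== LEMMAS AND PROOFS =====
theorem pvBLoop_eq (gs : List String) (f : Bool) :
    pvBLoop gs f =
      if gs.any (fun g => pvAdminGroups.any (fun a => PySem.Str.isIn (PySem.Str.lower a) (PySem.Str.lower g))) then "admin"
      else if f || gs.any (fun g => pvUserGroups.any (fun u => PySem.Str.isIn (PySem.Str.lower u) (PySem.Str.lower g))) then "user"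
      else "viewer" := by
  induction gs generalizing f with
  | nil => cases f <;> simp [pvBLoop]
  | cons g rest ih =>
    cases ha : pvAdminGroups.any (fun a => PySem.Str.isIn (PySem.Str.lower a) (PySem.Str.lower g)) <;>
    cases hu : pvUserGroups.any (fun u => PySem.Str.isIn (PySem.Str.lower u) (PySem.Str.lower g)) <;>
    simp only [pvBLoop, List.any_cons, ha, hu, ih, Bool.false_or, Bool.true_or, Bool.or_true,
      Bool.or_false, if_true, if_false, Bool.or_assoc] <;>
    cases f <;> simp

-- ===== VERDICT (by name: the statement is the Claim_ definition above) =====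
theorem map_groups_to_role_spec : Claim_equal_map_groups_to_role := by
  intro groups _
  unfold Spec_map_groups_to_role map_groups_to_role_alt map_groups_to_role
  rw [pvBLoop_eq]
  simp
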